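-- pv_equiv track=rewrite | github.com/erikrose/blessings | blessings/__init__.py | split_into_formatters
-- ===== SOURCE A (Python) =====
-- def split_into_formatters(compound):
--     """Split a possibly compound format string into segments.
--
--     >>> split_into_formatters('bold_underline_bright_blue_on_red')
--     ['bold', 'underline', 'bright_blue', 'on_red']
--
--     """
--     merged_segs = []
--     # These occur only as prefixes, so they can always be merged:
--     mergeable_prefixes = ['on', 'bright', 'on_bright']
--     for s in compound.split('_'):
--         if merged_segs and merged_segs[-1] in mergeable_prefixes:
--             merged_segs[-1] += '_' + s
--         else:
--             merged_segs.append(s)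
--     return merged_segs
-- ===== SOURCE B (Python) =====
-- def split_into_formatters(compound):
--     """Split a possibly compound format string into segments.
--
--     Treats the token stream as a tiny grammar and pattern-matches on its
--     head: 'on bright x', 'on x' / 'bright x', or a lone token, consuming
--     whole productions at a time instead of testing a growing segment.
--     """
--     segs = []
--     toks = compound.split('_')
--     while toks:
--         match toks:
--             case ['on', 'bright', x, *rest]:
--                 segs.append('on_bright_' + x)
--             case [('on' | 'bright') as p, x, *rest]:
--                 segs.append(p + '_' + x)
--             case [t, *rest]:
--                 segs.append(t)
--         toks = rest
--     return segs
-- ===== Notes on version B (the rewrite author's own statement) =====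
-- stated objective: alternative
-- what changed: Replaces A's fold that appends and then mutates its last appended segment (re-testing the growing segment against a prefix set) with a pattern match that consumes whole grammar productions ('on bright x' | 'on x' | 'bright x' | lone token) off the head of the token stream, emitting each finished segment once; the prefix-membership set and last-element mutation disappear.
import Mathlib
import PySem

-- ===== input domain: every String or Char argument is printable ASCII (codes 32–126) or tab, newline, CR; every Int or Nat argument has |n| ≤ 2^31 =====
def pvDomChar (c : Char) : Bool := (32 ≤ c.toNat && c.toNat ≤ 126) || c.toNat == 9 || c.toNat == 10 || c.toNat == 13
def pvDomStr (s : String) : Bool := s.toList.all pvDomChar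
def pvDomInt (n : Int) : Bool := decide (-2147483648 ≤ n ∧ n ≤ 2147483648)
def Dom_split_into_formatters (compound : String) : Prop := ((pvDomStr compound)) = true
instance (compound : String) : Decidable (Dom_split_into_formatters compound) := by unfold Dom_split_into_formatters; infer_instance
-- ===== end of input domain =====

-- ===== PORT A =====
-- B replaces A's fold that mutates the last appended segment by a pattern match
-- consuming whole productions ('on bright x' | 'on x' | 'bright x' | 't') off the
-- head of the token stream; same O(n) cost (objective: alternative).
def pvMergeablePrefixes : List String := ["on", "bright", "on_bright"]

-- one step of A's for-loop: merge into the last segment if it is a mergeable prefix, else append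
def pvStepA (acc : List String) (s : String) : List String :=
  if acc ≠ [] ∧ acc.getLastD "" ∈ pvMergeablePrefixes then
    acc.dropLast ++ [acc.getLastD "" ++ "_" ++ s]
  else acc ++ [s]

def split_into_formatters (compound : String) : List String :=
  ((PySem.Chars.splitOn compound.toList ['_']).map String.ofList).foldl pvStepA []

-- ===== PORT B =====
-- B's while-loop over the token stream: each iteration matches one production
-- at the head and emits one finished segment (Source B's `while toks: match toks: …`).
def pvGoB : List String → List String
  | "on" :: "bright" :: x :: rest => ("on_bright" ++ "_" ++ x) :: pvGoB rest
  | "on" :: x :: rest => ("on" ++ "_" ++ x) :: pvGoB rest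
  | "bright" :: x :: rest => ("bright" ++ "_" ++ x) :: pvGoB rest
  | t :: rest => t :: pvGoB rest
  | [] => []

def split_into_formatters_alt (compound : String) : List String :=
  pvGoB ((PySem.Chars.splitOn compound.toList ['_']).map String.ofList)

-- ===== PRECONDITION & SPEC =====
def Spec_split_into_formatters (compound : String) (out : List String) : Prop := out = split_into_formatters_alt compound
instance (compound : String) (out : List String) : Decidable (Spec_split_into_formatters compound out) := by unfold Spec_split_into_formatters; infer_instance

-- ===== CLAIM (what is proved, stated in full; the proofs are below) =====
def Claim_equal_split_into_formatters : Prop := ∀ (compound : String), Dom_split_into_formatters compound → Spec_split_into_formatters compound (split_into_formatters compound)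

-- ===== LEMMAS AND PROOFS =====

-- pieces produced by splitting on '_' never contain '_'
theorem pvSplitOn_go_no_sep (fuel : ℕ) (l cur : List Char) (acc : List (List Char))
    (hf : l.length < fuel) (hc : ('_' : Char) ∉ cur) (ha : ∀ p ∈ acc, ('_' : Char) ∉ p) :
    ∀ p ∈ PySem.Chars.splitOn.go ['_'] fuel l cur acc, ('_' : Char) ∉ p := by
  induction fuel generalizing l cur acc with
  | zero => omega
  | succ n ih =>
    cases l with
    | nil =>
      have e : PySem.Chars.splitOn.go ['_'] (n+1) [] cur acc = (cur.reverse :: acc).reverse := rfl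
      rw [e]
      intro p hp
      simp only [List.mem_reverse, List.mem_cons] at hp
      rcases hp with rfl | hp
      · simpa using hc
      · exact ha p hp
    | cons c rest =>
      have e : PySem.Chars.splitOn.go ['_'] (n+1) (c::rest) cur acc =
          (if List.isPrefixOf ['_'] (c::rest) then
            PySem.Chars.splitOn.go ['_'] n (List.drop 1 (c::rest)) [] (cur.reverse::acc)
          else PySem.Chars.splitOn.go ['_'] n rest (c::cur) acc) := rfl
      rw [e]
      by_cases h : c = '_'
      · subst h
        rw [if_pos (by simp [List.isPrefixOf])]
        apply ih
        · simpa using Nat.lt_of_succ_lt_succ hf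
        · simp
        · intro p hp
          rcases List.mem_cons.mp hp with rfl | hp
          · simpa using hc
          · exact ha p hp
      · rw [if_neg (by simp [List.isPrefixOf, Ne.symm h])]
        apply ih
        · simpa using Nat.lt_of_succ_lt_succ hf
        · intro hmem
          rcases List.mem_cons.mp hmem with h' | h'
          · exact h h'.symm
          · exact hc h'
        · exact ha

theorem pvSplitOn_no_sep (l : List Char) :
    ∀ p ∈ PySem.Chars.splitOn l ['_'], ('_' : Char) ∉ p := by
  unfold PySem.Chars.splitOn
  exact pvSplitOn_go_no_sep (l.length + 1) l [] [] (by omega) (by simp) (by simp)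

-- folding A's step over a state with a fixed non-empty prefix only touches the suffix
theorem pvStepA_shift (P l : List String) (hl : l ≠ []) (t : String) :
    pvStepA (P ++ l) t = P ++ pvStepA l t := by
  induction l using List.reverseRecOn with
  | nil => exact absurd rfl hl
  | append_singleton l' a _ =>
    unfold pvStepA
    by_cases h : a ∈ pvMergeablePrefixes <;>
      simp [h, ← List.append_assoc]

theorem pvFoldl_shift (ts : List String) (P l : List String) (hl : l ≠ []) :
    ts.foldl pvStepA (P ++ l) = P ++ ts.foldl pvStepA l := by
  induction ts generalizing l with
  | nil => rfl
  | cons t ts ih =>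
    rw [List.foldl_cons, List.foldl_cons, pvStepA_shift P l hl t]
    apply ih
    unfold pvStepA
    split <;> simp

-- once the last segment is not a mergeable prefix, the rest of the fold restarts from []
theorem pvFoldl_restart (ts : List String) (P : List String) (seg : String)
    (h : seg ∉ pvMergeablePrefixes) :
    ts.foldl pvStepA (P ++ [seg]) = P ++ [seg] ++ ts.foldl pvStepA [] := by
  cases ts with
  | nil => simp
  | cons t ts =>
    have h1 : pvStepA (P ++ [seg]) t = (P ++ [seg]) ++ [t] := by
      simp [pvStepA, h]
    have h2 : pvStepA [] t = [t] := by simp [pvStepA]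
    rw [List.foldl_cons, List.foldl_cons, h1, h2]
    exact pvFoldl_shift ts (P ++ [seg]) [t] (by simp)

-- literal toList values (kernel-checked)
theorem pv_tl_on : ("on" : String).toList = ['o','n'] := rfl
theorem pv_tl_bright : ("bright" : String).toList = ['b','r','i','g','h','t'] := rfl
theorem pv_tl_onbright : ("on_bright" : String).toList = ['o','n','_','b','r','i','g','h','t'] := rfl
theorem pv_tl_us : ("_" : String).toList = ['_'] := rfl

-- the three merged-segment shapes are never themselves mergeable prefixes
theorem pv_onbright_not_mem (x : String) :
    ("on_bright" ++ "_" ++ x) ∉ pvMergeablePrefixes := by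
  intro hmem
  simp only [pvMergeablePrefixes, List.mem_cons, List.not_mem_nil, or_false] at hmem
  rcases hmem with h | h | h <;>
    · have h' := congrArg String.toList h
      simp only [String.toList_append, pv_tl_on, pv_tl_bright, pv_tl_onbright, pv_tl_us] at h'
      simp at h'

theorem pv_on_not_mem (x : String) (hx : x ≠ "bright") :
    ("on" ++ "_" ++ x) ∉ pvMergeablePrefixes := by
  intro hmem
  simp only [pvMergeablePrefixes, List.mem_cons, List.not_mem_nil, or_false] at hmem
  rcases hmem with h | h | h
  · have h' := congrArg String.toList h
    simp only [String.toList_append, pv_tl_on, pv_tl_us] at h'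
    simp at h'
  · have h' := congrArg String.toList h
    simp only [String.toList_append, pv_tl_on, pv_tl_bright, pv_tl_us] at h'
    simp at h'
  · apply hx
    have h' := congrArg String.toList h
    simp only [String.toList_append, pv_tl_on, pv_tl_onbright, pv_tl_us] at h'
    simp only [List.cons_append, List.nil_append, List.cons.injEq, true_and] at h'
    exact String.toList_inj.mp (by rw [h', pv_tl_bright])

theorem pv_bright_not_mem (x : String) :
    ("bright" ++ "_" ++ x) ∉ pvMergeablePrefixes := by
  intro hmem
  simp only [pvMergeablePrefixes, List.mem_cons, List.not_mem_nil, or_false] at hmem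
  rcases hmem with h | h | h <;>
    · have h' := congrArg String.toList h
      simp only [String.toList_append, pv_tl_on, pv_tl_bright, pv_tl_onbright, pv_tl_us] at h'
      simp at h'

theorem pv_token_not_mem (t : String) (ht : ('_' : Char) ∉ t.toList)
    (h1 : t ≠ "on") (h2 : t ≠ "bright") : t ∉ pvMergeablePrefixes := by
  intro hmem
  simp only [pvMergeablePrefixes, List.mem_cons, List.not_mem_nil, or_false] at hmem
  rcases hmem with h | h | h
  · exact h1 h
  · exact h2 h
  · apply ht
    rw [h, pv_tl_onbright]
    simp

-- main: A's fold equals B's production-consuming scan on any underscore-free token list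
theorem pvFold_eq_goB (ts : List String) (H : ∀ t ∈ ts, ('_' : Char) ∉ t.toList) :
    ts.foldl pvStepA [] = pvGoB ts := by
  induction ts using pvGoB.induct with
  | case1 x rest ih =>
    have e1 : pvStepA [] "on" = ["on"] := by simp [pvStepA]
    have e2 : pvStepA ["on"] "bright" = ["on" ++ "_" ++ "bright"] := by
      simp [pvStepA, pvMergeablePrefixes]
    have e3 : pvStepA ["on" ++ "_" ++ "bright"] x = ["on_bright" ++ "_" ++ x] := by
      have e : ("on" ++ "_" ++ "bright" : String) = "on_bright" := rfl
      rw [e]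
      simp [pvStepA, pvMergeablePrefixes]
    rw [pvGoB.eq_1, List.foldl_cons, List.foldl_cons, List.foldl_cons, e1, e2, e3]
    have hr := pvFoldl_restart rest [] ("on_bright" ++ "_" ++ x) (pv_onbright_not_mem x)
    simp only [List.nil_append] at hr
    rw [hr, ih (fun t h => H t (List.mem_cons_of_mem _ (List.mem_cons_of_mem _ (List.mem_cons_of_mem _ h))))]
    simp
  | case2 x rest hne ih =>
    by_cases hx : x = "bright"
    · subst hx
      cases rest with
      | nil => decide
      | cons y r => exact absurd rfl (fun h => hne y r rfl h)
    · have e1 : pvStepA [] "on" = ["on"] := by simp [pvStepA]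
      have e2 : pvStepA ["on"] x = ["on" ++ "_" ++ x] := by
        simp [pvStepA, pvMergeablePrefixes]
      rw [pvGoB.eq_2 x rest hne, List.foldl_cons, List.foldl_cons, e1, e2]
      have hr := pvFoldl_restart rest [] ("on" ++ "_" ++ x) (pv_on_not_mem x hx)
      simp only [List.nil_append] at hr
      rw [hr, ih (fun t h => H t (List.mem_cons_of_mem _ (List.mem_cons_of_mem _ h)))]
      simp
  | case3 x rest ih =>
    have e1 : pvStepA [] "bright" = ["bright"] := by simp [pvStepA]
    have e2 : pvStepA ["bright"] x = ["bright" ++ "_" ++ x] := by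
      simp [pvStepA, pvMergeablePrefixes]
    rw [pvGoB.eq_3, List.foldl_cons, List.foldl_cons, e1, e2]
    have hr := pvFoldl_restart rest [] ("bright" ++ "_" ++ x) (pv_bright_not_mem x)
    simp only [List.nil_append] at hr
    rw [hr, ih (fun t h => H t (List.mem_cons_of_mem _ (List.mem_cons_of_mem _ h)))]
    simp
  | case4 t rest hne1 hne2 hne3 ih =>
    by_cases ht1 : t = "on"
    · subst ht1
      cases rest with
      | nil => decide
      | cons y r => exact absurd rfl (fun h => hne2 y r rfl h)
    · by_cases ht2 : t = "bright"
      · subst ht2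
        cases rest with
        | nil => decide
        | cons y r => exact absurd rfl (fun h => hne3 y r rfl h)
      · have e1 : pvStepA [] t = [t] := by simp [pvStepA]
        rw [pvGoB.eq_4 t rest hne1 hne2 hne3, List.foldl_cons, e1]
        have hr := pvFoldl_restart rest [] t
          (pv_token_not_mem t (H t (List.mem_cons_self ..)) ht1 ht2)
        simp only [List.nil_append] at hr
        rw [hr, ih (fun u h => H u (List.mem_cons_of_mem _ h))]
        simp
  | case5 => rfl

-- ===== VERDICT (by name: the statement is the Claim_ definition above) =====
theorem split_into_formatters_spec : Claim_equal_split_into_formatters := by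
  intro compound _
  unfold Spec_split_into_formatters split_into_formatters split_into_formatters_alt
  apply pvFold_eq_goB
  intro t ht
  rcases List.mem_map.mp ht with ⟨p, hp, rfl⟩
  rw [String.toList_ofList]
  exact pvSplitOn_no_sep compound.toList p hp
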